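-- pv_equiv track=rewrite | github.com/jatink-addweb/addweb | test/loop.py | minimumSets
-- ===== SOURCE A (Python) =====
-- def minimumSets(s, y,l):
--
-- 	cnt = 0
-- 	num = 0
--
-- 	f = 0
-- 	for i in range(l):
-- 		num = num * 10 + (ord(s[i]) - ord('0'))
-- 		if (num <= y):
-- 			f = 1
-- 		else:
--
--
-- 			if (f):
-- 				cnt += 1
-- 			num = ord(s[i]) - ord('0')
-- 			f = 0
-- 			if (num <= y):
-- 				f = 1
-- 			else:
-- 				num = 0
--
--
-- 	if (f):
-- 		cnt += 1
--
-- 	return cnt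
-- ===== SOURCE B (Python) =====
-- def minimumSets(s, y, l):
--     stack = [ord(s[i]) - ord('0') for i in range(l)][::-1]
--     cnt = 0
--     while stack:
--         num = 0
--         took = False
--         while stack and num * 10 + stack[-1] <= y:
--             num = num * 10 + stack.pop()
--             took = True
--         if took:
--             cnt += 1
--         else:
--             stack.pop()
--     return cnt
-- ===== Notes on version B (the rewrite author's own statement) =====
-- stated objective: alternative
-- what changed: Replaces the flag-driven single for-loop over indices with a staged stack algorithm: first materialize the digit values into an explicit reversed stack, then consume it destructively with pops, one maximal segment per outer iteration (no index variable, no f flag, no mid-loop state resets).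
import Mathlib
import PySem

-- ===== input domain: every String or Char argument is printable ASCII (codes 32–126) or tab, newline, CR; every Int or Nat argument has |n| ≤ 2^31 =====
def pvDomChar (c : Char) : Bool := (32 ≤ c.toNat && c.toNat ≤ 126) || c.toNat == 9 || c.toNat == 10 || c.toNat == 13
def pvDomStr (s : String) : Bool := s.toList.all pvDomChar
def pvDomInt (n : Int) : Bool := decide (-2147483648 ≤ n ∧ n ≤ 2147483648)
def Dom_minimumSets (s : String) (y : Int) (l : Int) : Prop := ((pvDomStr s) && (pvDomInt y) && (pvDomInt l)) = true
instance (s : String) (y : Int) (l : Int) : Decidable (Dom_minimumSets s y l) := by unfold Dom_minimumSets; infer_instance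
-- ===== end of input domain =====

-- B replaces A's flag-driven indexed for-loop by a staged stack algorithm (materialize the
-- digit values into a reversed stack, then consume it destructively by pops, one maximal
-- segment per outer round); same O(l) cost. Equivalence (return values) is proved on Pre_
-- (l ≤ len(s), where Python A returns; both Pythons raise IndexError outside it).

-- ===== PORT A =====
-- ord(s[i]) - ord('0'); inside Pre_ every index 0 ≤ i < l is in range, so the '0' default
-- of getD is never used (pyGet? = none is the IndexError case, excluded by Pre_).
def pyDigit (s : String) (i : Int) : Int :=
  (((PySem.Str.pyGet? s i).getD '0').toNat : Int) - (('0'.toNat : Nat) : Int)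

def minimumSets (s : String) (y : Int) (l : Int) : Int :=
  -- state = (cnt, num, f), exactly A's three variables
  let st := (PySem.List.pyRange 0 l 1).foldl (fun (st : Int × Int × Int) i =>
    let cnt := st.1
    let num := st.2.1 * 10 + pyDigit s i
    if num ≤ y then (cnt, num, 1)
    else
      let cnt := if st.2.2 ≠ 0 then cnt + 1 else cnt
      let num2 := pyDigit s i
      if num2 ≤ y then (cnt, num2, 1) else (cnt, 0, 0)) ((0 : Int), (0 : Int), (0 : Int))
  if st.2.2 ≠ 0 then st.1 + 1 else st.1

-- ===== PORT B =====
-- The Python stack is a list whose TOP is its last element: stack[-1] = getLastD (only read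
-- under st ≠ [], so the default is never used), stack.pop() = getLastD + dropLast.

theorem pvDropLast_lt {α : Type} {st : List α} (h : st ≠ []) :
    st.dropLast.length < st.length := by
  have := List.length_pos_iff.mpr h
  simp only [List.length_dropLast]
  omega

-- inner while: pop digits into num while stack nonempty and num*10 + top ≤ y
def altEat (y num : Int) (st : List Int) (took : Bool) : Int × List Int × Bool :=
  if h : st ≠ [] ∧ num * 10 + st.getLastD 0 ≤ y then
    altEat y (num * 10 + st.getLastD 0) st.dropLast true
  else (num, st, took)
termination_by st.length
decreasing_by exact pvDropLast_lt h.1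

theorem altEat_took_true (y : Int) : ∀ (n : ℕ) (st : List Int) (num : Int), st.length ≤ n →
    (altEat y num st true).2.2 = true := by
  intro n
  induction n with
  | zero =>
      intro st num hn
      have : st = [] := List.length_eq_zero_iff.mp (by omega)
      subst this
      rw [altEat, dif_neg (by simp)]
  | succ n ih =>
      intro st num hn
      rw [altEat]
      by_cases hc : st ≠ [] ∧ num * 10 + st.getLastD 0 ≤ y
      · rw [dif_pos hc]
        exact ih _ _ (by have := pvDropLast_lt hc.1; omega)
      · rw [dif_neg hc]

theorem altEat_false (y num : Int) (st : List Int)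
    (h : (altEat y num st false).2.2 = false) : (altEat y num st false).2.1 = st := by
  by_cases hc : st ≠ [] ∧ num * 10 + st.getLastD 0 ≤ y
  · exfalso
    rw [altEat, dif_pos hc,
      altEat_took_true y st.dropLast.length st.dropLast (num * 10 + st.getLastD 0) le_rfl] at h
    simp at h
  · rw [altEat, dif_neg hc]

theorem altEat_len_le (y : Int) : ∀ (n : ℕ) (st : List Int) (num : Int) (took : Bool),
    st.length ≤ n → (altEat y num st took).2.1.length ≤ st.length := by
  intro n
  induction n with
  | zero =>
      intro st num took hn
      have : st = [] := List.length_eq_zero_iff.mp (by omega)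
      subst this
      rw [altEat, dif_neg (by simp)]
  | succ n ih =>
      intro st num took hn
      rw [altEat]
      by_cases hc : st ≠ [] ∧ num * 10 + st.getLastD 0 ≤ y
      · rw [dif_pos hc]
        have h1 := pvDropLast_lt hc.1
        have h2 := ih st.dropLast (num * 10 + st.getLastD 0) true (by omega)
        omega
      · rw [dif_neg hc]
  
theorem altEat_true_lt (y num : Int) (st : List Int)
    (h : (altEat y num st false).2.2 = true) : (altEat y num st false).2.1.length < st.length := by
  rw [altEat] at h ⊢
  by_cases hc : st ≠ [] ∧ num * 10 + st.getLastD 0 ≤ y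
  · rw [dif_pos hc]
    have h1 := pvDropLast_lt hc.1
    have h2 := altEat_len_le y st.dropLast.length st.dropLast (num * 10 + st.getLastD 0) true le_rfl
    omega
  · rw [dif_neg hc] at h
    simp at h

-- outer while: one maximal segment per round (or pop the single oversized digit)
def altOuter (y : Int) (st : List Int) (cnt : Int) : Int :=
  if hne : st = [] then cnt
  else
    let r := altEat y 0 st false
    if ht : r.2.2 then altOuter y r.2.1 (cnt + 1)
    else altOuter y r.2.1.dropLast cnt
termination_by st.length
decreasing_by
  · exact altEat_true_lt y 0 st ht
  · have := altEat_false y 0 st (by simpa using ht)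
    rw [this]
    exact pvDropLast_lt hne

def minimumSets_alt (s : String) (y : Int) (l : Int) : Int :=
  -- stack = [ord(s[i]) - ord('0') for i in range(l)][::-1]; [::-1] is reverse
  -- (PySem.List.slice?_none_none_neg_one); s[i] raises outside Pre_, as in A.
  let stack := ((PySem.List.pyRange 0 l 1).map (fun i => pyDigit s i)).reverse
  altOuter y stack 0

-- ===== PRECONDITION & SPEC =====
-- Pre_ excludes exactly the inputs where Python A raises IndexError (an index i < l beyond the
-- end of s); B raises there too.
def Pre_minimumSets (s : String) (y : Int) (l : Int) : Prop := l ≤ (s.toList.length : Int)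
instance (s : String) (y : Int) (l : Int) : Decidable (Pre_minimumSets s y l) := by
  unfold Pre_minimumSets; infer_instance

def pvWitness_minimumSets : String × Int × Int := ("1234", 30, 4)

def Spec_minimumSets (s : String) (y : Int) (l : Int) (out : Int) : Prop := out = minimumSets_alt s y l
instance (s : String) (y : Int) (l : Int) (out : Int) : Decidable (Spec_minimumSets s y l out) := by
  unfold Spec_minimumSets; infer_instance

-- ===== CLAIM (what is proved, stated in full; the proofs are below) =====
def Claim_equal_minimumSets : Prop := ∀ (s : String) (y : Int) (l : Int), Dom_minimumSets s y l → Pre_minimumSets s y l → Spec_minimumSets s y l (minimumSets s y l)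

-- ===== LEMMAS AND PROOFS =====

-- A's loop body on a digit value, and its finalization
def aStep (y : Int) (st : Int × Int × Int) (d : Int) : Int × Int × Int :=
  let cnt := st.1
  let num := st.2.1 * 10 + d
  if num ≤ y then (cnt, num, 1)
  else
    let cnt := if st.2.2 ≠ 0 then cnt + 1 else cnt
    if d ≤ y then (cnt, d, 1) else (cnt, 0, 0)

def aFin (st : Int × Int × Int) : Int := if st.2.2 ≠ 0 then st.1 + 1 else st.1

theorem minimumSets_eq_fold (s : String) (y : Int) (l : Int) :
    minimumSets s y l =
      aFin (((PySem.List.pyRange 0 l 1).map (fun i => pyDigit s i)).foldl (aStep y) (0, 0, 0)) := by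
  unfold minimumSets aFin
  rw [List.foldl_map]
  rfl

-- front-of-list mirror of altEat: eatD consumes digits from the head
def eatD (y : Int) : Int → List Int → Int × List Int × Bool
  | num, [] => (num, [], false)
  | num, d :: ds =>
      if num * 10 + d ≤ y then
        let r := eatD y (num * 10 + d) ds
        (r.1, r.2.1, true)
      else (num, d :: ds, false)

theorem eatD_nil (y num : Int) : eatD y num [] = (num, [], false) := rfl

theorem eatD_cons (y num d : Int) (ds : List Int) :
    eatD y num (d :: ds) =
      if num * 10 + d ≤ y then
        ((eatD y (num * 10 + d) ds).1, (eatD y (num * 10 + d) ds).2.1, true)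
      else (num, d :: ds, false) := rfl

theorem eatD_len_le (y : Int) (ds : List Int) : ∀ (num : Int),
    (eatD y num ds).2.1.length ≤ ds.length := by
  induction ds with
  | nil => intro num; simp [eatD_nil]
  | cons d ds ih =>
      intro num
      rw [eatD_cons]
      by_cases hle : num * 10 + d ≤ y
      · rw [if_pos hle]
        have := ih (num * 10 + d)
        simpa using Nat.le_succ_of_le this
      · rw [if_neg hle]

theorem eatD_true_lt (y : Int) (d : Int) (ds : List Int)
    (h : (eatD y 0 (d :: ds)).2.2 = true) :
    (eatD y 0 (d :: ds)).2.1.length < (d :: ds).length := by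
  rw [eatD_cons] at h ⊢
  by_cases hle : (0 : Int) * 10 + d ≤ y
  · rw [if_pos hle]
    have := eatD_len_le y ds (0 * 10 + d)
    simpa using Nat.lt_succ_of_le this
  · rw [if_neg hle] at h
    simp at h

theorem eatD_true_lt' (y : Int) (ds : List Int) (hne : ds ≠ [])
    (h : (eatD y 0 ds).2.2 = true) : (eatD y 0 ds).2.1.length < ds.length := by
  cases ds with
  | nil => exact absurd rfl hne
  | cons d ds => exact eatD_true_lt y d ds h

-- altEat on a reversed list is eatD (with took ORed in)
theorem altEat_reverse (y : Int) (ds : List Int) : ∀ (num : Int) (took : Bool),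
    altEat y num ds.reverse took =
      ((eatD y num ds).1, (eatD y num ds).2.1.reverse, took || (eatD y num ds).2.2) := by
  induction ds with
  | nil =>
      intro num took
      rw [altEat, dif_neg (by simp)]
      simp [eatD_nil]
  | cons d ds ih =>
      intro num took
      have htop : (d :: ds).reverse.getLastD 0 = d := by
        simp [List.getLastD_eq_getLast?, List.getLast?_reverse]
      have hdl : (d :: ds).reverse.dropLast = ds.reverse := by
        simp [List.reverse_cons]
      rw [altEat]
      by_cases hle : num * 10 + d ≤ y
      · rw [dif_pos (by rw [htop]; exact ⟨by simp, hle⟩), htop, hdl, ih (num * 10 + d) true]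
        rw [eatD_cons, if_pos hle]
        simp
      · rw [dif_neg (by rw [htop]; intro hc; exact hle hc.2)]
        rw [eatD_cons, if_neg hle]
        simp
  
-- the front-of-list mirror of altOuter
def outerD (y : Int) (ds : List Int) (cnt : Int) : Int :=
  if hne : ds = [] then cnt
  else
    let r := eatD y 0 ds
    if ht : r.2.2 then outerD y r.2.1 (cnt + 1) else outerD y ds.tail cnt
termination_by ds.length
decreasing_by
  · exact eatD_true_lt' y ds hne ht
  · have := List.length_pos_iff.mpr hne
    simp only [List.length_tail]
    omega

theorem outerD_nil (y cnt : Int) : outerD y [] cnt = cnt := by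
  rw [outerD, dif_pos rfl]

theorem outerD_cons (y d : Int) (ds : List Int) (cnt : Int) :
    outerD y (d :: ds) cnt =
      if (eatD y 0 (d :: ds)).2.2 then outerD y (eatD y 0 (d :: ds)).2.1 (cnt + 1)
      else outerD y ds cnt := by
  rw [outerD, dif_neg (by simp)]
  by_cases ht : (eatD y 0 (d :: ds)).2.2
  · rw [dif_pos ht, if_pos ht]
  · rw [dif_neg ht, if_neg ht]
    rfl

theorem altOuter_reverse (y : Int) : ∀ (n : ℕ) (ds : List Int), ds.length ≤ n → ∀ (cnt : Int),
    altOuter y ds.reverse cnt = outerD y ds cnt := by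
  intro n
  induction n with
  | zero =>
      intro ds hn cnt
      have : ds = [] := List.length_eq_zero_iff.mp (by omega)
      subst this
      rw [altOuter, dif_pos (by simp), outerD_nil]
  | succ n ih =>
      intro ds hn cnt
      cases ds with
      | nil => rw [altOuter, dif_pos (by simp), outerD_nil]
      | cons d ds =>
          rw [altOuter, dif_neg (by simp)]
          rw [outerD_cons]
          have hrev := altEat_reverse y (d :: ds) 0 false
          by_cases ht : (eatD y 0 (d :: ds)).2.2
          · have h2 : (altEat y 0 (d :: ds).reverse false).2.2 = true := by
              rw [hrev]; simpa using ht
            rw [dif_pos h2, if_pos ht]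
            have h1 : (altEat y 0 (d :: ds).reverse false).2.1 = (eatD y 0 (d :: ds)).2.1.reverse := by
              rw [hrev]
            rw [h1]
            have hlen : (eatD y 0 (d :: ds)).2.1.length ≤ n := by
              have := eatD_true_lt y d ds ht
              simp at this hn
              omega
            exact ih _ (by simpa using hlen) (cnt + 1)
          · have h2 : ¬ (altEat y 0 (d :: ds).reverse false).2.2 = true := by
              rw [hrev]; simpa using ht
            rw [dif_neg h2, if_neg ht]
            have heq : (eatD y 0 (d :: ds)).2.1 = d :: ds := by
              rw [eatD_cons] at ht ⊢
              by_cases hle : (0 : Int) * 10 + d ≤ y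
              · rw [if_pos hle] at ht; simp at ht
              · rw [if_neg hle]
            have h1 : (altEat y 0 (d :: ds).reverse false).2.1 = (d :: ds).reverse := by
              rw [hrev, heq]
            rw [h1]
            have hdl : (d :: ds).reverse.dropLast = ds.reverse := by
              simp [List.reverse_cons]
            rw [hdl]
            exact ih ds (by simp at hn; omega) cnt

-- main invariant: A's fold equals the front-of-list segment recursion
theorem fold_eq_outerD (y : Int) : ∀ (ds : List Int),
    (∀ cnt, aFin (ds.foldl (aStep y) (cnt, 0, 0)) = outerD y ds cnt) ∧
    (∀ cnt num, num ≤ y →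
      aFin (ds.foldl (aStep y) (cnt, num, 1)) = outerD y (eatD y num ds).2.1 (cnt + 1)) := by
  intro ds
  induction ds with
  | nil =>
      exact ⟨fun cnt => by simp [aFin, outerD_nil],
             fun cnt num hnum => by simp [aFin, eatD_nil, outerD_nil]⟩
  | cons d ds ih =>
      have h010 : ∀ d' : Int, (0 : Int) * 10 + d' = d' := fun d' => by ring
      constructor
      · intro cnt
        simp only [List.foldl_cons]
        by_cases hd : d ≤ y
        · have hstep : aStep y (cnt, 0, 0) d = (cnt, d, 1) := by
            simp [aStep, hd]
          rw [hstep, ih.2 cnt d hd, outerD_cons]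
          rw [eatD_cons, h010 d, if_pos hd]
          simp
        · have hstep : aStep y (cnt, 0, 0) d = (cnt, 0, 0) := by
            simp [aStep, hd]
          rw [hstep, ih.1 cnt, outerD_cons]
          rw [eatD_cons, h010 d, if_neg hd]
          simp
      · intro cnt num hnum
        simp only [List.foldl_cons]
        by_cases hc : num * 10 + d ≤ y
        · have hstep : aStep y (cnt, num, 1) d = (cnt, num * 10 + d, 1) := by
            simp [aStep, hc]
          rw [hstep, ih.2 cnt _ hc, eatD_cons, if_pos hc]
        · have hrest : (eatD y num (d :: ds)).2.1 = d :: ds := by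
            rw [eatD_cons, if_neg hc]
          by_cases hd : d ≤ y
          · have hstep : aStep y (cnt, num, 1) d = (cnt + 1, d, 1) := by
              simp [aStep, if_neg hc, hd]
            rw [hstep, ih.2 (cnt + 1) d hd, hrest, outerD_cons]
            rw [eatD_cons, h010 d, if_pos hd]
            simp
          · have hstep : aStep y (cnt, num, 1) d = (cnt + 1, 0, 0) := by
              simp [aStep, if_neg hc, hd]
            rw [hstep, ih.1 (cnt + 1), hrest, outerD_cons]
            rw [eatD_cons, h010 d, if_neg hd]
            simp

-- ===== VERDICT (by name: the statement is the Claim_ definition above) =====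
theorem minimumSets_spec : Claim_equal_minimumSets := by
  intro s y l _ _
  unfold Spec_minimumSets minimumSets_alt
  rw [minimumSets_eq_fold]
  rw [altOuter_reverse y ((PySem.List.pyRange 0 l 1).map (fun i => pyDigit s i)).length _ le_rfl 0]
  exact (fold_eq_outerD y _).1 0
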